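-- pv_equiv track=rewrite | github.com/kpattaswamy/cs598project | preprocess/build_dataset.py | extract_impression_section
-- ===== SOURCE A (Python) =====
-- def extract_impression_section(text):
--     lines = text.split('\n')
--     impression_lines = []
--     found = False
--
--     for line in lines:
--         if not found and 'IMPRESSION' in line.upper():
--             found = True
--             parts = line.upper().split('IMPRESSION', maxsplit=1)
--             after = line[len(parts[0]) + len("IMPRESSION"):].strip(": ").strip()
--             if after:
--                 impression_lines.append(after)
--         elif found:
--             impression_lines.append(line.strip())
--
--     return '\n'.join(impression_lines).strip() if impression_lines else None
-- ===== SOURCE B (Python) =====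
-- def extract_impression_section(text):
--     idx = text.upper().find('IMPRESSION')
--     if idx == -1:
--         return None
--     first, *rest = text[idx + len('IMPRESSION'):].split('\n')
--     first = first.strip(': ').strip()
--     body = ([first] if first else []) + [line.strip() for line in rest]
--     return '\n'.join(body).strip() if body else None
-- ===== Notes on version B (the rewrite author's own statement) =====
-- stated objective: alternative
-- what changed: B never iterates over lines to locate the keyword: it does one case-insensitive find on the whole text, slices the raw text once after the match, and only then splits the tail on newlines, formatting first element and rest in one expression; A splits into lines first and runs a found-flag state machine over every line.
import Mathlib
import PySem

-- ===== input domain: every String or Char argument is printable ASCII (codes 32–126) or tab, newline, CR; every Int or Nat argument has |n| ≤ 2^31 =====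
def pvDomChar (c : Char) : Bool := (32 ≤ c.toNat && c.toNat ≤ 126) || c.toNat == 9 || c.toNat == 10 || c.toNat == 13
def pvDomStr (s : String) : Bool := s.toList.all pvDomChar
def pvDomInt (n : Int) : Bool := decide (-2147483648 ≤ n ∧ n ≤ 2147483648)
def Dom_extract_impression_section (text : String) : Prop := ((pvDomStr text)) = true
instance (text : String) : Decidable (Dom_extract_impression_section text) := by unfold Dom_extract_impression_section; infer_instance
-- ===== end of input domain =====

-- B locates the keyword with one case-insensitive find on the whole text and splits only the tail into lines, replacing A's line-split plus found-flag state machine (objective: alternative).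


-- the literal 'IMPRESSION'
def pvImpr : List Char := ['I','M','P','R','E','S','S','I','O','N']

-- ===== PORT A =====
-- A's loop body: found-flag state machine over the lines
def pvStepA (st : List (List Char) × Bool) (line : List Char) : List (List Char) × Bool :=
  if !st.2 && PySem.Chars.isIn pvImpr (PySem.Chars.upper line) then
    let parts := PySem.Chars.splitOnMax (PySem.Chars.upper line) pvImpr 1
    -- parts[0] is safe in Python: split always returns a non-empty list
    let after := PySem.Chars.strip (PySem.Chars.stripChars
        (PySem.List.slice line (some (((parts.headD []).length + pvImpr.length : Nat) : Int)) none) [':', ' '])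
    if after.isEmpty then (st.1, true) else (st.1 ++ [after], true)
  else if st.2 then (st.1 ++ [PySem.Chars.strip line], st.2) else st

def extract_impression_section (text : String) : Option String :=
  let lines := PySem.Chars.splitOn text.toList ['\n']
  let r := lines.foldl pvStepA ([], false)
  if r.1.isEmpty then none
  else some (String.ofList (PySem.Chars.strip (PySem.Chars.join ['\n'] r.1)))

-- ===== PORT B =====
-- idx = text.upper().find('IMPRESSION'); slice the raw text once; split only the tail
def extract_impression_section_alt (text : String) : Option String :=
  let s := text.toList
  let idx := PySem.Chars.find (PySem.Chars.upper s) pvImpr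
  if idx = -1 then none
  else
    -- first, *rest = text[idx + len('IMPRESSION'):].split('\n')
    let pieces := PySem.Chars.splitOn (PySem.List.slice s (some (idx + (pvImpr.length : Int))) none) ['\n']
    let first := PySem.Chars.strip (PySem.Chars.stripChars (pieces.headD []) [':', ' '])
    let body := (if first.isEmpty then [] else [first]) ++ pieces.tail.map PySem.Chars.strip
    if body.isEmpty then none
    else some (String.ofList (PySem.Chars.strip (PySem.Chars.join ['\n'] body)))

-- ===== PRECONDITION & SPEC =====
def Spec_extract_impression_section (text : String) (out : Option String) : Prop := out = extract_impression_section_alt text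
instance (text : String) (out : Option String) : Decidable (Spec_extract_impression_section text out) := by unfold Spec_extract_impression_section; infer_instance

-- ===== CLAIM (what is proved, stated in full; the proofs are below) =====
def Claim_equal_extract_impression_section : Prop := ∀ (text : String), Dom_extract_impression_section text → Spec_extract_impression_section text (extract_impression_section text)

-- ===== LEMMAS AND PROOFS =====

-- A's per-line tail: line[parts0len + 10:].strip(': ').strip(), with the position recomputed via find
def pvAfterB (ln : List Char) : List Char :=
  PySem.Chars.strip (PySem.Chars.stripChars
    (PySem.List.slice ln
      (some (PySem.Chars.find (PySem.Chars.upper ln) pvImpr + (pvImpr.length : Int))) none) [':', ' '])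

-- the per-line test A's loop applies
def pvP (ln : List Char) : Bool := PySem.Chars.isIn pvImpr (PySem.Chars.upper ln)

theorem pv_findgo_ge (l : List Char) (k : ℕ) :
    PySem.Chars.find.go pvImpr l k = -1 ∨ (k : ℤ) ≤ PySem.Chars.find.go pvImpr l k := by
  induction l generalizing k with
  | nil => simp [PySem.Chars.find.go, pvImpr]
  | cons c rest ih =>
    by_cases h : pvImpr.isPrefixOf (c :: rest) = true
    · simp [PySem.Chars.find.go, h]
    · simp only [PySem.Chars.find.go, h, Bool.false_eq_true, if_false]
      rcases ih (k + 1) with h0 | h0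
      · exact Or.inl h0
      · right; omega

theorem pv_findgo_succ (l : List Char) (k : ℕ) :
    PySem.Chars.find.go pvImpr l (k+1) =
      if PySem.Chars.find.go pvImpr l k = -1 then -1 else PySem.Chars.find.go pvImpr l k + 1 := by
  induction l generalizing k with
  | nil => simp [PySem.Chars.find.go, pvImpr]
  | cons c rest ih =>
    by_cases h : pvImpr.isPrefixOf (c :: rest) = true
    · simp [PySem.Chars.find.go, h]
    · simp only [PySem.Chars.find.go, h, Bool.false_eq_true, if_false]
      rw [show k + 1 + 1 = (k + 1) + 1 from rfl, ih (k + 1), ih k]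

theorem pv_splitgo_zero (fuel : ℕ) (l cur : List Char) (acc : List (List Char)) :
    PySem.Chars.splitOnMax.go pvImpr fuel 0 l cur acc = ((cur.reverse ++ l) :: acc).reverse := by
  cases fuel with
  | zero => rfl
  | succ f => cases l <;> simp [PySem.Chars.splitOnMax.go]

theorem pv_split_head_len (fuel : ℕ) (l cur : List Char)
    (hf : l.length < fuel) (hfind : PySem.Chars.find.go pvImpr l 0 ≠ -1) :
    ((PySem.Chars.splitOnMax.go pvImpr fuel 1 l cur []).headD []).length =
      cur.length + (PySem.Chars.find.go pvImpr l 0).toNat := by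
  induction fuel generalizing l cur with
  | zero => omega
  | succ f ih =>
    cases l with
    | nil => simp [PySem.Chars.find.go, pvImpr] at hfind
    | cons c rest =>
      by_cases h : pvImpr.isPrefixOf (c :: rest) = true
      · simp [PySem.Chars.splitOnMax.go, h, pv_splitgo_zero, PySem.Chars.find.go]
      · simp only [PySem.Chars.splitOnMax.go, h, Bool.false_eq_true, if_false,
          PySem.Chars.find.go] at hfind ⊢
        simp only [Nat.succ_ne_zero, if_false]
        have hrest : PySem.Chars.find.go pvImpr rest 0 ≠ -1 := by
          intro h0
          rw [show (1 : ℕ) = 0 + 1 from rfl, pv_findgo_succ, h0] at hfind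
          simp at hfind
        have hlen : rest.length < f := by simp at hf; omega
        rw [ih rest (c :: cur) hlen hrest]
        rw [show (1 : ℕ) = 0 + 1 from rfl, pv_findgo_succ]
        rcases pv_findgo_ge rest 0 with h0 | h0
        · exact absurd h0 hrest
        · simp only [hrest, if_false]
          simp
          omega

theorem pv_foldl_true (ls : List (List Char)) (acc : List (List Char)) :
    ls.foldl pvStepA (acc, true) = (acc ++ ls.map PySem.Chars.strip, true) := by
  induction ls generalizing acc with
  | nil => simp
  | cons c rest ih => simp [pvStepA, ih]

theorem pv_after_stepA (ln : List Char) (h : PySem.Chars.isIn pvImpr (PySem.Chars.upper ln) = true) :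
    PySem.Chars.strip (PySem.Chars.stripChars
        (PySem.List.slice ln
          (some ((((PySem.Chars.splitOnMax (PySem.Chars.upper ln) pvImpr 1).headD []).length
            + pvImpr.length : Nat) : Int)) none) [':', ' ']) = pvAfterB ln := by
  unfold pvAfterB
  have hfind : PySem.Chars.find (PySem.Chars.upper ln) pvImpr ≠ -1 := by
    rw [PySem.Chars.find_ne_neg_one_iff]
    exact (PySem.Chars.isIn_iff_infix _ _).mp h
  have hnn : 0 ≤ PySem.Chars.find (PySem.Chars.upper ln) pvImpr := by
    have := PySem.Chars.neg_one_le_find (PySem.Chars.upper ln) pvImpr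
    omega
  have hhead : ((PySem.Chars.splitOnMax (PySem.Chars.upper ln) pvImpr 1).headD []).length =
      (PySem.Chars.find (PySem.Chars.upper ln) pvImpr).toNat := by
    unfold PySem.Chars.splitOnMax
    rw [if_neg (by omega), show Int.toNat 1 = 1 from rfl]
    rw [pv_split_head_len ((PySem.Chars.upper ln).length + 1) (PySem.Chars.upper ln) []
      (by omega) hfind]
    simp [PySem.Chars.find]
  rw [hhead]
  have hidx : (((PySem.Chars.find (PySem.Chars.upper ln) pvImpr).toNat + pvImpr.length : Nat) : Int)
      = PySem.Chars.find (PySem.Chars.upper ln) pvImpr + (pvImpr.length : Int) := by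
    push_cast
    omega
  rw [hidx]

-- A's fold, in locate-then-format normal form over the line list
theorem pv_main (lines : List (List Char)) :
    lines.foldl pvStepA ([], false) =
      match lines.findIdx? pvP with
      | none => ([], false)
      | some hit =>
        ((if (pvAfterB (lines.getD hit [])).isEmpty then [] else [pvAfterB (lines.getD hit [])])
           ++ (lines.drop (hit + 1)).map PySem.Chars.strip, true) := by
  induction lines with
  | nil => rfl
  | cons c rest ih =>
    by_cases h : PySem.Chars.isIn pvImpr (PySem.Chars.upper c) = true
    · simp only [List.findIdx?_cons, pvP, h, if_true, List.foldl_cons]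
      have hstep : pvStepA ([], false) c =
          ((if (pvAfterB c).isEmpty then [] else [pvAfterB c]), true) := by
        simp only [pvStepA, h, Bool.not_false, Bool.and_true, if_true]
        rw [pv_after_stepA c h]
        split_ifs <;> simp
      rw [hstep]
      simp only [List.getD_cons_zero, List.drop_succ_cons, List.drop_zero]
      split_ifs with hA <;> simp [pv_foldl_true]
    · simp only [List.findIdx?_cons, pvP, h, if_false, List.foldl_cons,
        Bool.false_eq_true]
      have hstep : pvStepA ([], false) c = ([], false) := by
        simp [pvStepA, h]
      rw [hstep, ih]
      cases hfi : rest.findIdx? pvP with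
      | none => simp
      | some i => simp [List.getD]

-- splitOn.go with a non-empty accumulator: the accumulator is emitted in front
theorem pv_go_acc (fuel : ℕ) (l cur : List Char) (acc : List (List Char)) :
    PySem.Chars.splitOn.go ['\n'] fuel l cur acc =
      acc.reverse ++ PySem.Chars.splitOn.go ['\n'] fuel l cur [] := by
  induction fuel generalizing l cur acc with
  | zero => simp [PySem.Chars.splitOn.go]
  | succ f ih =>
    cases l with
    | nil => simp [PySem.Chars.splitOn.go]
    | cons c rest =>
      by_cases h : (['\n'] : List Char).isPrefixOf (c :: rest) = true
      · simp only [PySem.Chars.splitOn.go, h, if_true]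
        rw [ih _ _ (cur.reverse :: acc), ih _ _ [cur.reverse]]
        simp
      · simp only [PySem.Chars.splitOn.go, h, Bool.false_eq_true, if_false]
        exact ih _ _ _

-- splitOn.go with a partial current chunk: the chunk is prepended to the first output
theorem pv_go_cur (fuel : ℕ) (l cur : List Char) :
    PySem.Chars.splitOn.go ['\n'] fuel l cur [] =
      (cur.reverse ++ (PySem.Chars.splitOn.go ['\n'] fuel l [] []).headD [])
        :: (PySem.Chars.splitOn.go ['\n'] fuel l [] []).tail := by
  induction fuel generalizing l cur with
  | zero => simp [PySem.Chars.splitOn.go]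
  | succ f ih =>
    cases l with
    | nil => simp [PySem.Chars.splitOn.go]
    | cons c rest =>
      by_cases h : (['\n'] : List Char).isPrefixOf (c :: rest) = true
      · simp only [PySem.Chars.splitOn.go, h, if_true, List.reverse_nil]
        rw [pv_go_acc f _ [] [cur.reverse], pv_go_acc f _ [] [[]]]
        simp
      · simp only [PySem.Chars.splitOn.go, h, Bool.false_eq_true, if_false]
        rw [ih rest (c :: cur), ih rest [c]]
        simp

-- cons laws of splitOn on '\n'
theorem pv_splitOn_nil : PySem.Chars.splitOn [] ['\n'] = [[]] := rfl

theorem pv_splitOn_nl (t : List Char) :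
    PySem.Chars.splitOn ('\n' :: t) ['\n'] = [] :: PySem.Chars.splitOn t ['\n'] := by
  have h0 : PySem.Chars.splitOn ('\n' :: t) ['\n']
      = PySem.Chars.splitOn.go ['\n'] (t.length + 1 + 1) ('\n' :: t) [] [] := by
    simp [PySem.Chars.splitOn]
  rw [h0]
  have hpre : (['\n'] : List Char).isPrefixOf ('\n' :: t) = true := by
    simp [List.isPrefixOf]
  simp only [PySem.Chars.splitOn.go, hpre, if_true, List.reverse_nil, List.length_cons,
    List.drop_succ_cons]
  rw [pv_go_acc]
  simp [PySem.Chars.splitOn]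

theorem pv_splitOn_cons (c : Char) (t : List Char) (hc : c ≠ '\n') :
    PySem.Chars.splitOn (c :: t) ['\n'] =
      (c :: (PySem.Chars.splitOn t ['\n']).headD []) :: (PySem.Chars.splitOn t ['\n']).tail := by
  have h0 : PySem.Chars.splitOn (c :: t) ['\n']
      = PySem.Chars.splitOn.go ['\n'] (t.length + 1 + 1) (c :: t) [] [] := by
    simp [PySem.Chars.splitOn]
  rw [h0]
  have hpre : (['\n'] : List Char).isPrefixOf (c :: t) = false := by
    simp [List.isPrefixOf]
    intro h
    exact absurd h.symm hc
  simp only [PySem.Chars.splitOn.go, hpre, Bool.false_eq_true, if_false]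
  rw [pv_go_cur]
  simp [PySem.Chars.splitOn]

theorem pv_splitOn_ne_nil (t : List Char) :
    PySem.Chars.splitOn t ['\n'] =
      (PySem.Chars.splitOn t ['\n']).headD [] :: (PySem.Chars.splitOn t ['\n']).tail := by
  cases t with
  | nil => rfl
  | cons c t' =>
    by_cases hc : c = '\n'
    · subst hc; rw [pv_splitOn_nl]; rfl
    · rw [pv_splitOn_cons c t' hc]; rfl

-- dropping inside the first line drops inside the first chunk
theorem pv_splitOn_drop (s : List Char) (n : ℕ)
    (hn : n ≤ ((PySem.Chars.splitOn s ['\n']).headD []).length) :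
    PySem.Chars.splitOn (s.drop n) ['\n'] =
      ((PySem.Chars.splitOn s ['\n']).headD []).drop n :: (PySem.Chars.splitOn s ['\n']).tail := by
  induction s generalizing n with
  | nil =>
    rw [pv_splitOn_nil] at hn
    have h0 : n = 0 := by simpa using hn
    subst h0
    rfl
  | cons c t ih =>
    by_cases hc : c = '\n'
    · subst hc
      rw [pv_splitOn_nl] at hn ⊢
      have h0 : n = 0 := by simpa using hn
      subst h0
      simp [pv_splitOn_nl]
    · rw [pv_splitOn_cons c t hc] at hn ⊢
      cases n with
      | zero => simp [pv_splitOn_cons c t hc]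
      | succ m =>
        simp only [List.headD_cons, List.length_cons, Nat.succ_le_succ_iff] at hn
        simp only [List.drop_succ_cons, List.headD_cons, List.tail_cons]
        exact ih m hn

-- a newline-free prefix of the whole text is a prefix of its first line, and conversely
theorem pv_prefix_line (u : List Char) (hu : ∀ a ∈ u, a ≠ '\n') :
    ∀ s : List Char,
      u.isPrefixOf (PySem.Chars.upper s)
        = u.isPrefixOf (PySem.Chars.upper ((PySem.Chars.splitOn s ['\n']).headD [])) := by
  induction u with
  | nil => intro s; simp [List.isPrefixOf]
  | cons a u' ih =>
    intro s
    cases s with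
    | nil => rfl
    | cons c t =>
      by_cases hc : c = '\n'
      · subst hc
        rw [pv_splitOn_nl]
        have ha : a ≠ '\n' := hu a (List.mem_cons_self)
        have hupc : PySem.Chars.upperChar '\n' = '\n' := by decide
        simp [PySem.Chars.upper, List.isPrefixOf, hupc, ha]
      · rw [pv_splitOn_cons c t hc]
        simp only [List.headD_cons, PySem.Chars.upper, List.map_cons, List.isPrefixOf]
        have ih' := ih (fun a ha => hu a (List.mem_cons_of_mem _ ha)) t
        simp only [PySem.Chars.upper] at ih'
        rw [ih']

-- 'IMPRESSION' contains no newline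
theorem pv_impr_no_nl : ∀ a ∈ pvImpr, a ≠ '\n' := by
  intro a ha
  simp only [pvImpr, List.mem_cons, List.not_mem_nil, or_false] at ha
  rcases ha with rfl|rfl|rfl|rfl|rfl|rfl|rfl|rfl|rfl|rfl <;> decide

-- one unfolding step of find on a cons
theorem pv_find_cons (c : Char) (t : List Char) :
    PySem.Chars.find (c :: t) pvImpr =
      if pvImpr.isPrefixOf (c :: t) = true then 0
      else if PySem.Chars.find t pvImpr = -1 then -1 else PySem.Chars.find t pvImpr + 1 := by
  unfold PySem.Chars.find
  by_cases h : pvImpr.isPrefixOf (c :: t) = true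
  · simp [PySem.Chars.find.go, h]
  · simp only [PySem.Chars.find.go, h, Bool.false_eq_true, if_false]
    exact pv_findgo_succ t 0

-- upper distributes over cons
theorem pv_upper_cons (c : Char) (t : List Char) :
    PySem.Chars.upper (c :: t) = PySem.Chars.upperChar c :: PySem.Chars.upper t := rfl

-- a find that hits is a natural number
theorem pv_find_nat (l : List Char) (h : PySem.Chars.find l pvImpr ≠ -1) :
    ∃ k : ℕ, PySem.Chars.find l pvImpr = (k : ℤ) := by
  rcases pv_findgo_ge l 0 with h0 | h0
  · exact absurd h0 h
  · refine ⟨(PySem.Chars.find l pvImpr).toNat, ?_⟩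
    have h1 : (0 : ℤ) ≤ PySem.Chars.find l pvImpr := by exact_mod_cast h0
    omega

-- find on a cons whose head does not start a match: the shifted form
theorem pv_find_cons_shift (c : Char) (t : List Char)
    (hpre : pvImpr.isPrefixOf (PySem.Chars.upper (c :: t)) = false) :
    PySem.Chars.find (PySem.Chars.upper (c :: t)) pvImpr =
      if PySem.Chars.find (PySem.Chars.upper t) pvImpr = -1 then -1
      else PySem.Chars.find (PySem.Chars.upper t) pvImpr + 1 := by
  rw [pv_upper_cons, pv_find_cons, if_neg (by rw [← pv_upper_cons, hpre]; simp)]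

-- the per-line test through one extra non-matching character
theorem pv_P_cons (c : Char) (ln : List Char)
    (hpre : pvImpr.isPrefixOf (PySem.Chars.upper (c :: ln)) = false) :
    pvP (c :: ln) = pvP ln := by
  simp only [pvP, PySem.Chars.isIn, pv_find_cons_shift c ln hpre]
  by_cases h : PySem.Chars.find (PySem.Chars.upper ln) pvImpr = -1
  · rw [if_pos h, h]
  · rcases pv_find_nat _ h with ⟨k, hk⟩
    rw [if_neg h, hk]
    have ha : ((k : ℤ) + 1 != -1) = true := by rw [bne_iff_ne]; omega
    have hb : ((k : ℤ) != -1) = true := by rw [bne_iff_ne]; omega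
    rw [ha, hb]

-- the bridge: whole-text find against A's first-matching-line scan
theorem pv_locate (s : List Char) :
    (PySem.Chars.find (PySem.Chars.upper s) pvImpr = -1 ∧
      (PySem.Chars.splitOn s ['\n']).findIdx? pvP = none)
    ∨ (∃ i hit j : ℕ,
        PySem.Chars.find (PySem.Chars.upper s) pvImpr = (i : ℤ) ∧
        (PySem.Chars.splitOn s ['\n']).findIdx? pvP = some hit ∧
        PySem.Chars.find (PySem.Chars.upper ((PySem.Chars.splitOn s ['\n']).getD hit [])) pvImpr = (j : ℤ) ∧
        PySem.Chars.splitOn (s.drop (i + 10)) ['\n'] =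
          ((PySem.Chars.splitOn s ['\n']).getD hit []).drop (j + 10)
            :: (PySem.Chars.splitOn s ['\n']).drop (hit + 1)) := by
  induction s with
  | nil => exact Or.inl ⟨by decide, by decide⟩
  | cons c t ih =>
    by_cases hc : c = '\n'
    · subst hc
      have hsp := pv_splitOn_nl t
      have hpre : pvImpr.isPrefixOf (PySem.Chars.upper ('\n' :: t)) = false := by
        rw [pv_upper_cons]
        simp [pvImpr, List.isPrefixOf, show PySem.Chars.upperChar '\n' = '\n' by decide]
      have hfind := pv_find_cons_shift '\n' t hpre
      have hP0 : pvP ([] : List Char) = false := by decide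
      rcases ih with ⟨hf, hidx⟩ | ⟨i, hit, j, h1, h2, h3, h4⟩
      · left
        refine ⟨by rw [hfind, if_pos hf], ?_⟩
        rw [hsp, List.findIdx?_cons, hP0]
        simp [hidx]
      · right
        refine ⟨i + 1, hit + 1, j, ?_, ?_, ?_, ?_⟩
        · rw [hfind, h1, if_neg (by omega)]
          push_cast; ring
        · rw [hsp, List.findIdx?_cons, hP0]
          simp [h2]
        · rw [hsp, List.getD_cons_succ]
          exact h3
        · rw [hsp, List.getD_cons_succ,
            show i + 1 + 10 = (i + 10) + 1 by ring, List.drop_succ_cons, h4,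
            show hit + 1 + 1 = (hit + 1) + 1 by ring, List.drop_succ_cons]
    · have hsp := pv_splitOn_cons c t hc
      have hlines := pv_splitOn_ne_nil t
      have hPL : pvImpr.isPrefixOf (PySem.Chars.upper (c :: t))
          = pvImpr.isPrefixOf (PySem.Chars.upper (c :: (PySem.Chars.splitOn t ['\n']).headD [])) := by
        have h0 := pv_prefix_line pvImpr pv_impr_no_nl (c :: t)
        rw [hsp] at h0
        simpa using h0
      by_cases hpre : pvImpr.isPrefixOf (PySem.Chars.upper (c :: t)) = true
      · -- the keyword starts at position 0 of the text and of its first line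
        right
        have hprefL : pvImpr.isPrefixOf (PySem.Chars.upper
            (c :: (PySem.Chars.splitOn t ['\n']).headD [])) = true := by
          rw [← hPL]; exact hpre
        have hfindL0 : PySem.Chars.find (PySem.Chars.upper
            (c :: (PySem.Chars.splitOn t ['\n']).headD [])) pvImpr = 0 := by
          rw [pv_upper_cons, pv_find_cons, if_pos (by rw [← pv_upper_cons]; exact hprefL)]
        have hPL0 : pvP (c :: (PySem.Chars.splitOn t ['\n']).headD []) = true := by
          simp only [pvP, PySem.Chars.isIn]
          rw [hfindL0]
          rfl
        have hlen : 10 ≤ (c :: (PySem.Chars.splitOn t ['\n']).headD []).length := by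
          have hp := List.isPrefixOf_iff_prefix.mp hprefL
          have h0 := hp.length_le
          simpa [pvImpr, PySem.Chars.upper] using h0
        refine ⟨0, 0, 0, ?_, ?_, ?_, ?_⟩
        · rw [pv_upper_cons, pv_find_cons, if_pos (by rw [← pv_upper_cons]; exact hpre)]
          norm_num
        · rw [hsp, List.findIdx?_cons, hPL0]
          rfl
        · rw [hsp, List.getD_cons_zero]
          exact hfindL0
        · have hdrop := pv_splitOn_drop (c :: t) 10 (by rw [hsp]; simpa using hlen)
          rw [hsp] at hdrop
          simp only [List.headD_cons, List.tail_cons] at hdrop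
          rw [show (0:ℕ) + 10 = 10 by ring, hdrop, hsp, List.getD_cons_zero,
            show (0:ℕ) + 1 = 1 by ring]
          rfl
      · -- no match at position 0: everything shifts by one character
        have hpre' : pvImpr.isPrefixOf (PySem.Chars.upper (c :: t)) = false := by
          cases h0 : pvImpr.isPrefixOf (PySem.Chars.upper (c :: t))
          · rfl
          · exact absurd h0 hpre
        have hprefL : pvImpr.isPrefixOf (PySem.Chars.upper
            (c :: (PySem.Chars.splitOn t ['\n']).headD [])) = false := by
          rw [← hPL]; exact hpre'
        have hPeq : pvP (c :: (PySem.Chars.splitOn t ['\n']).headD [])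
            = pvP ((PySem.Chars.splitOn t ['\n']).headD []) := pv_P_cons _ _ hprefL
        have hfind := pv_find_cons_shift c t hpre'
        rcases ih with ⟨hf, hidx⟩ | ⟨i, hit, j, h1, h2, h3, h4⟩
        · left
          rw [hlines, List.findIdx?_cons] at hidx
          have hPH : pvP ((PySem.Chars.splitOn t ['\n']).headD []) = false := by
            by_cases h : pvP ((PySem.Chars.splitOn t ['\n']).headD []) = true
            · rw [h] at hidx; simp at hidx
            · cases h0 : pvP ((PySem.Chars.splitOn t ['\n']).headD [])
              · rfl
              · exact absurd h0 h
          rw [hPH] at hidx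
          simp only [Bool.false_eq_true, if_false] at hidx
          refine ⟨by rw [hfind, if_pos hf], ?_⟩
          rw [hsp, List.findIdx?_cons, hPeq, hPH]
          simpa using hidx
        · right
          rw [hlines, List.findIdx?_cons] at h2
          by_cases hPH : pvP ((PySem.Chars.splitOn t ['\n']).headD []) = true
          · -- the first line of t matches: hit = 0, that line gains the character c
            rw [hPH] at h2
            simp only [if_true] at h2
            have hhit0 : hit = 0 := by
              have h0 := h2
              simp only [Option.some_inj] at h0
              omega
            subst hhit0
            have hgetD0 : (PySem.Chars.splitOn t ['\n']).getD 0 []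
                = (PySem.Chars.splitOn t ['\n']).headD [] := by
              rw [hlines]; rfl
            rw [hgetD0] at h3
            have hfindL : PySem.Chars.find (PySem.Chars.upper
                (c :: (PySem.Chars.splitOn t ['\n']).headD [])) pvImpr = ((j + 1 : ℕ) : ℤ) := by
              rw [pv_find_cons_shift c _ hprefL, h3, if_neg (by omega)]
              push_cast; ring
            refine ⟨i + 1, 0, j + 1, ?_, ?_, ?_, ?_⟩
            · rw [hfind, h1, if_neg (by omega)]; push_cast; ring
            · rw [hsp, List.findIdx?_cons, hPeq, hPH]; rfl
            · rw [hsp, List.getD_cons_zero]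
              exact hfindL
            · rw [hsp, List.getD_cons_zero,
                show i + 1 + 10 = (i + 10) + 1 by ring, List.drop_succ_cons, h4, hgetD0,
                show j + 1 + 10 = (j + 10) + 1 by ring, List.drop_succ_cons]
              rw [hlines, show (0:ℕ) + 1 = 1 by ring]
              rfl
          · -- the match is in a later line: everything below the first line is shared
            have hPH' : pvP ((PySem.Chars.splitOn t ['\n']).headD []) = false := by
              cases h0 : pvP ((PySem.Chars.splitOn t ['\n']).headD [])
              · rfl
              · exact absurd h0 hPH
            rw [hPH'] at h2
            simp only [Bool.false_eq_true, if_false, Option.map_eq_some_iff] at h2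
            rcases h2 with ⟨k, hk, hhit⟩
            refine ⟨i + 1, hit, j, ?_, ?_, ?_, ?_⟩
            · rw [hfind, h1, if_neg (by omega)]; push_cast; ring
            · rw [hsp, List.findIdx?_cons, hPeq, hPH']
              simp [hk, hhit]
            · rw [hsp, ← hhit, List.getD_cons_succ]
              rw [hlines, ← hhit, List.getD_cons_succ] at h3
              exact h3
            · rw [hsp, ← hhit, List.getD_cons_succ,
                show i + 1 + 10 = (i + 10) + 1 by ring, List.drop_succ_cons, h4,
                hlines, ← hhit, List.getD_cons_succ]
              simp only [List.tail_cons, List.headD_cons, List.drop_succ_cons]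

-- ===== VERDICT (by name: the statement is the Claim_ definition above) =====
theorem extract_impression_section_spec : Claim_equal_extract_impression_section := by
  intro text _
  unfold Spec_extract_impression_section extract_impression_section extract_impression_section_alt
  simp only [pv_main]
  rcases pv_locate text.toList with ⟨hf, hidx⟩ | ⟨i, hit, j, h1, h2, h3, h4⟩
  · rw [hidx, hf]
    simp
  · have hne : ((i : ℤ)) ≠ -1 := by omega
    have hsl : PySem.List.slice text.toList (some ((i : ℤ) + (pvImpr.length : ℤ))) none
        = text.toList.drop (i + 10) := by
      rw [show ((i : ℤ) + (pvImpr.length : ℤ)) = ((i + 10 : ℕ) : ℤ) by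
        simp only [pvImpr]; push_cast; norm_num]
      exact PySem.List.slice_from_natCast _ _
    have hafter : pvAfterB ((PySem.Chars.splitOn text.toList ['\n']).getD hit [])
        = PySem.Chars.strip (PySem.Chars.stripChars
            (((PySem.Chars.splitOn text.toList ['\n']).getD hit []).drop (j + 10)) [':', ' ']) := by
      unfold pvAfterB
      rw [h3, show ((j : ℤ) + (pvImpr.length : ℤ)) = ((j + 10 : ℕ) : ℤ) by
        simp only [pvImpr]; push_cast; norm_num]
      rw [PySem.List.slice_from_natCast]
    rw [h2, h1, if_neg hne, hsl, h4]
    simp only [hafter, List.headD_cons, List.tail_cons]
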